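-- pv_equiv track=rewrite | github.com/zjzjwang/codefun | p1077.py | solve
-- ===== SOURCE A (Python) =====
-- def solve(s: str):
--     s = list(s)
--     n = len(s)
--     res = 0
--     for i in range(1, n):
--         if s[i] == s[i - 1]:
--             s[i] = '*'
--             res += 1
--     return res
-- ===== SOURCE B (Python) =====
-- def solve(s: str):
--     res = 0
--     run = 0
--     prev = None
--     for c in s:
--         if run > 0 and c == prev:
--             run += 1
--         else:
--             res += run // 2
--             run = 1
--             prev = c
--     return res + run // 2
-- ===== Notes on version B (the rewrite author's own statement) =====
-- stated objective: simpler
-- what changed: B replaces A's list-copy-and-mutate star-sentinel pass with a single run-length counting loop that adds floor(run/2) per maximal run of equal characters, using O(1) extra space and no list copy.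
-- intended difference: On strings whose run decomposition has a '*'-run of length >= 3 or an even-length run immediately followed by a '*'-run, A's '*' sentinel collides with the literal '*' in the input and A over-counts (e.g. A('aa*') = 2), while B returns the intended merge count floor(L/2) per maximal run (1 for 'aa*'). — e.g. on solve("aa*"): A returns 2, B returns 1
import Mathlib
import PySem

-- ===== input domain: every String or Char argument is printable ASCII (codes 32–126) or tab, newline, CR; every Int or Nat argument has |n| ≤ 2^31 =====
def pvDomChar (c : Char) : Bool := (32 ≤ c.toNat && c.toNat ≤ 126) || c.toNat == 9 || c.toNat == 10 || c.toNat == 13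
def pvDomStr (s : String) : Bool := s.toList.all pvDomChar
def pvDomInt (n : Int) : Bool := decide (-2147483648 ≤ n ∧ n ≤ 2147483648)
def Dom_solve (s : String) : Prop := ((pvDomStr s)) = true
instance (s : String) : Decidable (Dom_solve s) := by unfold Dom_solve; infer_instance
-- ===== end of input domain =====

-- B replaces A's list-copy-and-mutate '*'-sentinel pass by a run-length counting loop
-- (sum of floor(run/2) over maximal runs); same value except where A's sentinel collides
-- with a literal '*' in the input (see D_solve below).

-- ===== PORT A =====
-- step of A's 'for i in range(1, n)' loop; state = (the mutable list, res)
def aStep (st : List Char × Int) (i : Int) : List Char × Int :=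
  if PySem.List.pyGet? st.1 i = PySem.List.pyGet? st.1 (i - 1) then
    (PySem.List.pySetD st.1 i '*', st.2 + 1)
  else st

def solve (s : String) : Int :=
  let l := s.toList
  let n : Int := (l.length : Int)
  ((PySem.List.pyRange 1 n 1).foldl aStep (l, 0)).2

-- ===== PORT B =====
-- B's 'for c in s' loop; state = (res, run, prev)
def bLoop (res run : Int) (prev : Option Char) : List Char → Int
  | [] => res + PySem.Int.floordiv run 2
  | c :: t =>
    if 0 < run ∧ some c = prev then bLoop res (run + 1) prev t
    else bLoop (res + PySem.Int.floordiv run 2) 1 (some c) t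

def solve_alt (s : String) : Int := bLoop 0 0 none s.toList

-- ===== PRECONDITION & SPEC =====
-- On strings where a literal '*' immediately follows a maximal run of equal characters of
-- even length, A's '*' sentinel collides with the real '*' and A over-counts (e.g. "aa*" -> 2),
-- while B returns the intended floor(run/2) merge count per maximal run (1 for "aa*").
-- Closed form, over the run-length decomposition of the input (runs = maximal runs of equal
-- characters, as (char, length) pairs): either some run of '*' has length ≥ 3 (so a '*' follows
-- an even-length prefix of its own run), or some run of even length is immediately followed by
-- a run of '*'.
-- tail-recursive run-length decomposition: maximal runs of equal adjacent characters
def runsGo (acc : List (Char × Nat)) (cur : Char) (n : Nat) : List Char → List (Char × Nat)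
  | [] => ((cur, n) :: acc).reverse
  | c :: t => if c = cur then runsGo acc cur (n + 1) t else runsGo ((cur, n) :: acc) c 1 t

def runs : List Char → List (Char × Nat)
  | [] => []
  | c :: t => runsGo [] c 1 t

-- badPairs checks that shape on the run list: a '*'-run of length ≥ 3, or an
-- even-length run immediately followed by a '*'-run
def badPairs : List (Char × Nat) → Bool
  | [] => false
  | g :: rest =>
    decide (g.1 = '*' ∧ 3 ≤ g.2) ||
    (match rest with
     | [] => false
     | h :: _ => decide (g.2 % 2 = 0 ∧ h.1 = '*')) ||
    badPairs rest

def D_solve (s : String) : Prop := badPairs (runs s.toList) = true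
instance (s : String) : Decidable (D_solve s) := by unfold D_solve; infer_instance

def Spec_solve (s : String) (out : Int) : Prop := ¬ D_solve s → out = solve_alt s
instance (s : String) (out : Int) : Decidable (Spec_solve s out) := by unfold Spec_solve; infer_instance

def pvDiffWitness_solve : String := "aa*"
def pvDiffWitnessOut_solve : Int × Int := (2, 1)

-- ===== CLAIM (what is proved, stated in full; the proofs are below) =====
def Claim_unchanged_solve : Prop := ∀ (s : String), Dom_solve s → Spec_solve s (solve s)
def Claim_changed_solve : Prop := Dom_solve (pvDiffWitness_solve) ∧ D_solve (pvDiffWitness_solve) ∧ solve (pvDiffWitness_solve) = pvDiffWitnessOut_solve.1 ∧ solve_alt (pvDiffWitness_solve) = pvDiffWitnessOut_solve.2 ∧ pvDiffWitnessOut_solve.1 ≠ pvDiffWitnessOut_solve.2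
def Claim_exact_solve : Prop := ∀ (s : String), Dom_solve s → D_solve s → solve s ≠ solve_alt s

-- ===== LEMMAS AND PROOFS =====

-- proof-only helpers: A's result characterised as a recursion (mc), a scan (badStar)
-- deciding whether a sentinel collision occurs, and the maximal-run-length function runlen.

def mc : Char → List Char → Int
  | _, [] => 0
  | p, c :: t => if c = p then 1 + mc '*' t else mc c t

def mcTop : List Char → Int
  | [] => 0
  | c :: t => mc c t

-- ev = "current maximal run (char p) has even length so far"
def badStar (p : Char) (ev : Bool) : List Char → Bool
  | [] => false
  | c :: t =>
    if ev ∧ c = '*' then true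
    else if c = p then badStar p (!ev) t
    else badStar c false t

def dCheck : List Char → Bool
  | [] => false
  | c :: t => badStar c false t

-- length of the maximal run of equal characters ending at index i
def runlen (l : List Char) : ℕ → ℕ
  | 0 => 1
  | i+1 => if l[i+1]? = l[i]? then runlen l i + 1 else 1

def Rl (l : List Char) : Prop :=
  ∃ i, 0 < i ∧ i < l.length ∧ l[i]? = some '*' ∧ runlen l (i-1) % 2 = 0

-- Druns l is definitionally D_solve's formula on the list l
def Druns (l : List Char) : Prop :=
  (∃ g ∈ runs l, g.1 = '*' ∧ 3 ≤ g.2) ∨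
  ∃ p ∈ (runs l).zip (runs l).tail, p.1.2 % 2 = 0 ∧ p.2.1 = '*'


lemma runsGo_spec : ∀ (t : List Char) (acc : List (Char × Nat)) (cur : Char) (n : Nat),
    runsGo acc cur n t =
      acc.reverse ++ (cur, n + (t.takeWhile (· == cur)).length) ::
        runs (t.dropWhile (· == cur)) := by
  intro t
  induction t with
  | nil => intro acc cur n; simp [runsGo, runs]
  | cons c t' ih =>
    intro acc cur n
    by_cases hc : c = cur
    · subst hc
      rw [show runsGo acc c n (c :: t') = runsGo acc c (n + 1) t' from by simp [runsGo], ih,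
        List.takeWhile_cons_of_pos (by simp), List.dropWhile_cons_of_pos (by simp)]
      simp only [List.length_cons]
      have : n + (1 + (t'.takeWhile (· == c)).length) = n + 1 + (t'.takeWhile (· == c)).length := by
        omega
      rw [show (t'.takeWhile (· == c)).length + 1 = 1 + (t'.takeWhile (· == c)).length from by
        omega, this]
    · rw [show runsGo acc cur n (c :: t') = runsGo ((cur, n) :: acc) c 1 t' from by
        simp [runsGo, hc], ih,
        List.takeWhile_cons_of_neg (by simp [Ne.symm (fun h => hc h.symm)]),
        List.dropWhile_cons_of_neg (by simp [Ne.symm (fun h => hc h.symm)])]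
      have hrw : runs (c :: t') = runsGo [] c 1 t' := rfl
      rw [← hrw] at *
      simp [runs, ih [] c 1]

-- the run-length decomposition extracts the leading maximal run
lemma runs_cons (c : Char) (t : List Char) :
    runs (c :: t) = (c, 1 + (t.takeWhile (· == c)).length) :: runs (t.dropWhile (· == c)) := by
  have h := runsGo_spec t [] c 1
  simpa [runs] using h

lemma take_run (c : Char) (t : List Char) :
    ∀ j, j < 1 + (t.takeWhile (· == c)).length → (c :: t)[j]? = some c := by
  intro j hj
  cases j with
  | zero => rfl
  | succ j =>
    have hjl : j < (t.takeWhile (· == c)).length := by omega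
    have h1 : (c :: t)[j+1]? = t[j]? := rfl
    have h2 : t[j]? = (t.takeWhile (· == c) ++ t.dropWhile (· == c))[j]? := by
      rw [List.takeWhile_append_dropWhile]
    have h3 : (t.takeWhile (· == c) ++ t.dropWhile (· == c))[j]? = (t.takeWhile (· == c))[j]? :=
      List.getElem?_append_left hjl
    have h4 : (t.takeWhile (· == c))[j]? = some ((t.takeWhile (· == c))[j]) :=
      List.getElem?_eq_getElem hjl
    have h5 : (t.takeWhile (· == c))[j] = c := by
      have hm : (t.takeWhile (· == c))[j] ∈ t.takeWhile (· == c) := List.getElem_mem _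
      have := List.mem_takeWhile_imp hm
      simpa using this
    rw [h1, h2, h3, h4, h5]

lemma drop_run (c : Char) (t : List Char) :
    (c :: t).drop (1 + (t.takeWhile (· == c)).length) = t.dropWhile (· == c) := by
  have hsplit : t.takeWhile (· == c) ++ t.dropWhile (· == c) = t :=
    List.takeWhile_append_dropWhile
  set A := t.takeWhile (· == c) with hA
  set B := t.dropWhile (· == c) with hB
  rw [show 1 + A.length = A.length + 1 from by omega, List.drop_succ_cons, ← hsplit,
    List.drop_left]

lemma head_run (c : Char) (t : List Char) :
    (c :: t)[1 + (t.takeWhile (· == c)).length]? = (t.dropWhile (· == c)).head? := by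
  have h1 : (c :: t)[1 + (t.takeWhile (· == c)).length + 0]? =
      ((c :: t).drop (1 + (t.takeWhile (· == c)).length))[0]? := List.getElem?_drop.symm
  simpa [drop_run, List.head?_eq_getElem?] using h1

lemma bound_run (c : Char) (t : List Char) :
    (c :: t)[1 + (t.takeWhile (· == c)).length]? ≠ (c :: t)[(t.takeWhile (· == c)).length]? := by
  rw [head_run, take_run c t (t.takeWhile (· == c)).length (by omega)]
  cases hd : (t.dropWhile (· == c)) with
  | nil => simp
  | cons d t' =>
    have hne : (d == c) = false := by
      have hw : t.dropWhile (· == c) ≠ [] := by rw [hd]; simp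
      have := List.head_dropWhile_not (· == c) (l := t) hw
      have h? : (t.dropWhile (· == c)).head? = some ((t.dropWhile (· == c)).head hw) :=
        List.head?_eq_some_head hw
      conv at h? => lhs; rw [hd]
      simp only [List.head?_cons, Option.some.injEq] at h?
      rw [← h?] at this
      simpa using this
    simp only [List.head?_cons, ne_eq, Option.some.injEq]
    exact fun he => by simp [he] at hne

lemma runlen_take (c : Char) (t : List Char) :
    ∀ j, j < 1 + (t.takeWhile (· == c)).length → runlen (c :: t) j = j + 1 := by
  intro j
  induction j with
  | zero => intro _; rfl
  | succ j ih =>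
    intro hj
    have h1 : runlen (c :: t) (j+1) =
        if (c :: t)[j+1]? = (c :: t)[j]? then runlen (c :: t) j + 1 else 1 := rfl
    rw [h1, if_pos (by rw [take_run c t (j+1) hj, take_run c t j (by omega)]), ih (by omega)]

lemma runlen_shift (c : Char) (t : List Char) :
    ∀ j, runlen (c :: t) (1 + (t.takeWhile (· == c)).length + j) =
      runlen (t.dropWhile (· == c)) j := by
  intro j
  induction j with
  | zero =>
    have hk : 1 + (t.takeWhile (· == c)).length + 0 = (t.takeWhile (· == c)).length + 1 := by omega
    rw [hk]
    have h1 : runlen (c :: t) ((t.takeWhile (· == c)).length + 1) =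
        if (c :: t)[(t.takeWhile (· == c)).length + 1]? = (c :: t)[(t.takeWhile (· == c)).length]?
        then runlen (c :: t) (t.takeWhile (· == c)).length + 1 else 1 := rfl
    rw [h1, if_neg (by
      have := bound_run c t
      rw [show 1 + (t.takeWhile (· == c)).length = (t.takeWhile (· == c)).length + 1 from by omega] at this
      exact this)]
    rfl
  | succ j ih =>
    have h1 : runlen (c :: t) (1 + (t.takeWhile (· == c)).length + (j + 1)) =
        if (c :: t)[1 + (t.takeWhile (· == c)).length + j + 1]? =
            (c :: t)[1 + (t.takeWhile (· == c)).length + j]?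
        then runlen (c :: t) (1 + (t.takeWhile (· == c)).length + j) + 1 else 1 := rfl
    have h2 : runlen (t.dropWhile (· == c)) (j+1) =
        if (t.dropWhile (· == c))[j+1]? = (t.dropWhile (· == c))[j]? then
          runlen (t.dropWhile (· == c)) j + 1 else 1 := rfl
    have hg : ∀ m, (c :: t)[1 + (t.takeWhile (· == c)).length + m]? = (t.dropWhile (· == c))[m]? := by
      intro m
      rw [← drop_run c t, List.getElem?_drop]
    rw [h1, h2, show 1 + (t.takeWhile (· == c)).length + j + 1 =
      1 + (t.takeWhile (· == c)).length + (j+1) from by omega, hg (j+1), hg j, ih]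

lemma step_R (c : Char) (t : List Char) :
    Rl (c :: t) ↔ (c = '*' ∧ 3 ≤ 1 + (t.takeWhile (· == c)).length) ∨
      ((t.dropWhile (· == c)).head? = some '*' ∧ (1 + (t.takeWhile (· == c)).length) % 2 = 0) ∨
      Rl (t.dropWhile (· == c)) := by
  have hlen : (c :: t).length = 1 + (t.takeWhile (· == c)).length + (t.dropWhile (· == c)).length := by
    have hsplit : t.takeWhile (· == c) ++ t.dropWhile (· == c) = t :=
      List.takeWhile_append_dropWhile
    have h := congrArg List.length hsplit
    rw [List.length_append] at h
    simp only [List.length_cons]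
    omega
  have hg : ∀ m, (c :: t)[1 + (t.takeWhile (· == c)).length + m]? = (t.dropWhile (· == c))[m]? := by
    intro m
    rw [← drop_run c t, List.getElem?_drop]
  set k := 1 + (t.takeWhile (· == c)).length with hk
  have hk1 : 1 ≤ k := by omega
  constructor
  · rintro ⟨i, hi0, hilen, hstar, hev⟩
    rcases Nat.lt_or_ge i k with hik | hik
    · -- inside leading run: c = '*' and run long enough
      left
      have hci := take_run c t i hik
      rw [hstar] at hci
      have hc : c = '*' := (Option.some.inj hci).symm
      have hrl : runlen (c :: t) (i - 1) = i := by
        have := runlen_take c t (i - 1) (by omega)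
        rw [this]; omega
      rw [hrl] at hev
      exact ⟨hc, by omega⟩
    · rcases Nat.eq_or_lt_of_le hik with he | hlt
      · -- exactly at the boundary
        right; left
        refine ⟨?_, ?_⟩
        · rw [← head_run c t, ← hk, he]; exact hstar
        · have h4 := runlen_take c t (i - 1) (by omega)
          rw [h4] at hev
          omega
      · -- beyond: collision in the tail
        right; right
        refine ⟨i - k, by omega, by omega, ?_, ?_⟩
        · rw [← hg (i - k), show k + (i - k) = i from by omega]; exact hstar
        · have := runlen_shift c t (i - k - 1)
          rw [← hk, show k + (i - k - 1) = i - 1 from by omega] at this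
          rw [← this]; exact hev
  · rintro (⟨hc, hk3⟩ | ⟨hstar, hkev⟩ | ⟨j, hj0, hjlen, hstar, hev⟩)
    · refine ⟨2, by omega, by omega, ?_, ?_⟩
      · rw [take_run c t 2 (by omega), hc]
      · have := runlen_take c t 1 (by omega)
        rw [this]
    · refine ⟨k, by omega, ?_, ?_, ?_⟩
      · have hne : t.dropWhile (· == c) ≠ [] := by
          intro h; rw [h] at hstar; simp at hstar
        have : 0 < (t.dropWhile (· == c)).length := List.length_pos_of_ne_nil hne
        omega
      · rw [← head_run c t, ← hk] at hstar; exact hstar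
      · have := runlen_take c t (k - 1) (by omega)
        rw [this, show k - 1 + 1 = k from by omega]
        exact hkev
    · refine ⟨k + j, by omega, by omega, ?_, ?_⟩
      · rw [hg j]; exact hstar
      · have := runlen_shift c t (j - 1)
        rw [← hk, show k + (j - 1) = k + j - 1 from by omega] at this
        rw [this]; exact hev

lemma step_D (c : Char) (t : List Char) :
    Druns (c :: t) ↔ (c = '*' ∧ 3 ≤ 1 + (t.takeWhile (· == c)).length) ∨
      ((t.dropWhile (· == c)).head? = some '*' ∧ (1 + (t.takeWhile (· == c)).length) % 2 = 0) ∨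
      Druns (t.dropWhile (· == c)) := by
  have hruns : runs (c :: t) = (c, 1 + (t.takeWhile (· == c)).length) ::
      runs (t.dropWhile (· == c)) := runs_cons c t
  unfold Druns
  rw [hruns]
  cases hr : runs (t.dropWhile (· == c)) with
  | nil =>
    have hnil : t.dropWhile (· == c) = [] := by
      cases hdd : t.dropWhile (· == c) with
      | nil => rfl
      | cons d t' => rw [hdd, runs_cons] at hr; cases hr
    simp [hnil]
  | cons b rs =>
    have hhead : ∀ (hb : b.1 = '*'), (t.dropWhile (· == c)).head? = some '*' := by
      intro hb
      cases hdd : t.dropWhile (· == c) with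
      | nil => rw [hdd] at hr; simp [runs] at hr
      | cons d t' =>
        rw [hdd, runs_cons] at hr
        have hdb : d = b.1 := by
          have := congrArg (fun l => (l.headD ('?', 0)).1) hr
          simpa using this
        rw [List.head?_cons, hdb, hb]
    have hhead' : (t.dropWhile (· == c)).head? = some '*' → b.1 = '*' := by
      intro hs
      cases hdd : t.dropWhile (· == c) with
      | nil => rw [hdd] at hs; simp at hs
      | cons d t' =>
        rw [hdd] at hs
        simp only [List.head?_cons, Option.some.injEq] at hs
        rw [hdd, runs_cons] at hr
        have hbd : b.1 = d := by
          have := congrArg (fun l => (l.headD ('?', 0)).1) hr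
          simpa using this.symm
        rw [hbd, hs]
    constructor
    · rintro (⟨g, hg, h1, h2⟩ | ⟨p, hp, h1, h2⟩)
      · rcases List.mem_cons.mp hg with rfl | hg'
        · exact Or.inl ⟨h1, by simpa using h2⟩
        · exact Or.inr (Or.inr (Or.inl ⟨g, hr ▸ hg', h1, h2⟩))
      · rcases List.mem_cons.mp (by simpa [List.zip_cons_cons] using hp) with rfl | hp'
        · exact Or.inr (Or.inl ⟨hhead (by simpa using h2), by simpa using h1⟩)
        · exact Or.inr (Or.inr (Or.inr ⟨p, by simpa using hp', h1, h2⟩))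
    · rintro (⟨h1, h2⟩ | ⟨h1, h2⟩ | ⟨g, hg, h1, h2⟩ | ⟨p, hp, h1, h2⟩)
      · exact Or.inl ⟨_, List.mem_cons_self .., h1, by simpa using h2⟩
      · exact Or.inr ⟨((c, 1 + (t.takeWhile (· == c)).length), b),
          by simp [List.zip_cons_cons], h2, hhead' h1⟩
      · exact Or.inl ⟨g, List.mem_cons_of_mem _ hg, h1, h2⟩
      · refine Or.inr ⟨p, ?_, h1, h2⟩
        simp only [List.zip_cons_cons, List.tail_cons] at hp ⊢
        exact List.mem_cons_of_mem _ hp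

lemma R_iff_Druns : ∀ (n : ℕ) (l : List Char), l.length ≤ n → (Rl l ↔ Druns l) := by
  intro n
  induction n with
  | zero =>
    intro l hl
    have : l = [] := List.eq_nil_of_length_eq_zero (by omega)
    subst this
    simp [Rl, Druns, runs]
  | succ n ih =>
    intro l hl
    cases l with
    | nil => simp [Rl, Druns, runs]
    | cons c t =>
      rw [step_R, step_D, ih (t.dropWhile (· == c))
        (by
          have := List.length_dropWhile_le (· == c) t
          simp only [List.length_cons] at hl
          omega)]


-- badStar scans exactly for the runlen-even-then-'*' pattern
lemma badStar_iff (l : List Char) : ∀ (d m : ℕ) (p : Char), m + d = l.length → 1 ≤ m →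
    l[m-1]? = some p →
    (badStar p (decide (runlen l (m-1) % 2 = 0)) (l.drop m) = true ↔
      ∃ i, m ≤ i ∧ i < l.length ∧ l[i]? = some '*' ∧ runlen l (i-1) % 2 = 0) := by
  intro d
  induction d with
  | zero =>
    intro m p hm _ _
    rw [List.drop_eq_nil_of_le (by omega)]
    simp only [badStar]
    constructor
    · intro h; cases h
    · rintro ⟨i, h1, h2, _⟩; omega
  | succ d ih =>
    intro m p hm hm1 hp
    obtain ⟨m', rfl⟩ : ∃ m', m = m' + 1 := ⟨m - 1, by omega⟩
    simp only [Nat.add_sub_cancel] at hp ⊢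
    have hmlt : m' + 1 < l.length := by omega
    have hdrop : l.drop (m' + 1) = l[m' + 1] :: l.drop (m' + 2) :=
      List.drop_eq_getElem_cons hmlt
    rw [hdrop]
    set c := l[m' + 1] with hc
    have hcg : l[m' + 1]? = some c := List.getElem?_eq_getElem hmlt
    have hrl : runlen l (m' + 1) = if l[m' + 1]? = l[m']? then runlen l m' + 1 else 1 := rfl
    simp only [badStar]
    by_cases hflag : decide (runlen l m' % 2 = 0) = true ∧ c = '*'
    · rw [if_pos hflag]
      simp only [true_iff]
      refine ⟨m' + 1, le_rfl, hmlt, ?_, ?_⟩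
      · rw [hcg, hflag.2]
      · simpa using of_decide_eq_true hflag.1
    · rw [if_neg hflag]
      have hnoti : ¬ (l[m' + 1]? = some '*' ∧ runlen l m' % 2 = 0) := by
        intro ⟨h1, h2⟩
        exact hflag ⟨decide_eq_true h2, by rw [hcg] at h1; exact Option.some.inj h1⟩
      have hshift :
          ((∃ i, m' + 2 ≤ i ∧ i < l.length ∧ l[i]? = some '*' ∧ runlen l (i-1) % 2 = 0) ↔
           (∃ i, m' + 1 ≤ i ∧ i < l.length ∧ l[i]? = some '*' ∧ runlen l (i-1) % 2 = 0)) := by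
        constructor
        · rintro ⟨i, h1, h2, h3, h4⟩; exact ⟨i, by omega, h2, h3, h4⟩
        · rintro ⟨i, h1, h2, h3, h4⟩
          rcases Nat.eq_or_lt_of_le h1 with he | hlt
          · subst he
            simp only [Nat.add_sub_cancel] at h4
            exact absurd ⟨h3, h4⟩ hnoti
          · exact ⟨i, hlt, h2, h3, h4⟩
      have hih := fun (q : Char) (hq : l[m' + 2 - 1]? = some q) =>
        ih (m' + 2) q (by omega) (by omega) hq
      by_cases hcp : c = p
      · rw [if_pos hcp]
        have hrun : runlen l (m' + 1) = runlen l m' + 1 := by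
          rw [hrl, if_pos (by rw [hcg, hcp, hp])]
        have hev : (!decide (runlen l m' % 2 = 0)) = decide (runlen l (m' + 2 - 1) % 2 = 0) := by
          have h21 : m' + 2 - 1 = m' + 1 := rfl
          rw [h21, hrun]
          rcases Nat.even_or_odd (runlen l m') with he | ho
          · simp [Nat.even_iff.mp he, Nat.succ_mod_two_eq_one_iff.mpr (Nat.even_iff.mp he)]
          · simp [Nat.odd_iff.mp ho, Nat.succ_mod_two_eq_zero_iff.mpr (Nat.odd_iff.mp ho)]
        rw [hev, hih p (by simpa using hcp ▸ hcg)]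
        exact hshift
      · rw [if_neg hcp]
        have hrun : runlen l (m' + 1) = 1 := by
          rw [hrl, if_neg (by rw [hcg, hp]; exact fun he => hcp (Option.some.inj he))]
        have hev : (false : Bool) = decide (runlen l (m' + 2 - 1) % 2 = 0) := by
          have h21 : m' + 2 - 1 = m' + 1 := rfl
          rw [h21, hrun]
          simp
        rw [hev, hih c (by simpa using hcg)]
        exact hshift

lemma dCheck_iff_R (s : String) : dCheck s.toList = true ↔ Rl s.toList := by
  unfold Rl
  cases hs : s.toList with
  | nil =>
    simp only [dCheck]
    constructor
    · intro h; cases h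
    · rintro ⟨i, _, h2, _⟩; simp at h2
  | cons c t =>
    have h1 : (c :: t)[0]? = some c := rfl
    have hb := badStar_iff (c :: t) t.length 1 c (by rw [List.length_cons]; omega) le_rfl h1
    simp only [List.drop_one, List.tail_cons] at hb
    have hr : runlen (c :: t) 0 = 1 := rfl
    rw [hr] at hb
    simp only [dCheck]
    rw [show decide ((1:ℕ) % 2 = 0) = false from rfl] at hb
    rw [hb]
    constructor
    · rintro ⟨i, h1', h2, h3, h4⟩; exact ⟨i, by omega, h2, h3, h4⟩
    · rintro ⟨i, h1', h2, h3, h4⟩; exact ⟨i, by omega, h2, h3, h4⟩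

lemma badPairs_iff (rs : List (Char × Nat)) :
    badPairs rs = true ↔
      (∃ g ∈ rs, g.1 = '*' ∧ 3 ≤ g.2) ∨
      ∃ p ∈ rs.zip rs.tail, p.1.2 % 2 = 0 ∧ p.2.1 = '*' := by
  induction rs with
  | nil => simp [badPairs]
  | cons g rest ih =>
    cases rest with
    | nil => simp [badPairs]
    | cons h rest' =>
      rw [show badPairs (g :: h :: rest') =
        (decide (g.1 = '*' ∧ 3 ≤ g.2) || decide (g.2 % 2 = 0 ∧ h.1 = '*') ||
          badPairs (h :: rest')) from rfl]
      simp only [Bool.or_eq_true, decide_eq_true_eq, ih, List.zip_cons_cons, List.tail_cons,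
        List.mem_cons]
      constructor
      · rintro ((h1 | h2) | (⟨g', hg', hp⟩ | ⟨p, hp', hq⟩))
        · exact Or.inl ⟨g, Or.inl rfl, h1⟩
        · exact Or.inr ⟨(g, h), Or.inl rfl, h2⟩
        · exact Or.inl ⟨g', Or.inr hg', hp⟩
        · exact Or.inr ⟨p, Or.inr hp', hq⟩
      · rintro (⟨g', (rfl | hg'), hp⟩ | ⟨p, (rfl | hp'), hq⟩)
        · exact Or.inl (Or.inl hp)
        · exact Or.inr (Or.inl ⟨g', hg', hp⟩)
        · exact Or.inl (Or.inr hq)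
        · exact Or.inr (Or.inr ⟨p, hp', hq⟩)

lemma dCheck_iff_D (s : String) : dCheck s.toList = true ↔ D_solve s := by
  unfold D_solve
  rw [badPairs_iff]
  exact (dCheck_iff_R s).trans (R_iff_Druns s.toList.length s.toList le_rfl)

-- === A equals mcTop ===
lemma bridgeA (a : List Char) : ∀ (m k : ℕ) (l : List Char) (res : Int) (p : Char),
    1 ≤ k → k + m = a.length → l.length = a.length →
    (∀ j, k ≤ j → l[j]? = a[j]?) → l[k-1]? = some p →
    ((PySem.List.pyRange (k : Int) (a.length : Int) 1).foldl aStep (l, res)).2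
      = res + mc p (a.drop k) := by
  intro m
  induction m with
  | zero =>
    intro k l res p hk hm hl _ _
    rw [PySem.List.pyRange_one_eq_nil (by omega)]
    simp [List.drop_eq_nil_of_le (by omega : a.length ≤ k), mc]
  | succ m ih =>
    intro k l res p hk hm hl hagree hprev
    have hklen : k < a.length := by omega
    rw [PySem.List.pyRange_one_cons (by exact_mod_cast (by omega : (k : Int) < a.length))]
    rw [List.foldl_cons]
    have hgk : PySem.List.pyGet? l (k : Int) = some a[k] := by
      rw [PySem.List.pyGet?_natCast, hagree k le_rfl, List.getElem?_eq_getElem hklen]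
    have hcast : ((k : Int) - 1) = ((k - 1 : ℕ) : Int) := by omega
    have hgk1 : PySem.List.pyGet? l ((k : Int) - 1) = some p := by
      rw [hcast, PySem.List.pyGet?_natCast, hprev]
    have hdrop : a.drop k = a[k] :: a.drop (k + 1) := List.drop_eq_getElem_cons hklen
    by_cases h : a[k] = p
    · have hstep : aStep (l, res) (k : Int) = (l.set k '*', res + 1) := by
        simp [aStep, hgk, hgk1, h, PySem.List.pySetD_natCast]
      rw [hstep]
      have := ih (k + 1) (l.set k '*') (res + 1) '*' (by omega) (by omega)
        (by simpa using hl)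
        (by
          intro j hj
          rw [List.getElem?_set_ne (by omega)]
          exact hagree j (by omega))
        (by
          simp only [Nat.add_sub_cancel]
          rw [List.getElem?_set_self (by omega)])
      push_cast at this ⊢
      rw [this, hdrop, mc, if_pos h]
      ring
    · have hstep : aStep (l, res) (k : Int) = (l, res) := by
        simp [aStep, hgk, hgk1, h]
      rw [hstep]
      have := ih (k + 1) l res a[k] (by omega) (by omega) hl
        (fun j hj => hagree j (by omega))
        (by
          simp only [Nat.add_sub_cancel]
          rw [hagree k le_rfl, List.getElem?_eq_getElem hklen])
      push_cast at this ⊢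
      rw [this, hdrop, mc, if_neg h]

lemma solve_eq_mcTop (s : String) : solve s = mcTop s.toList := by
  unfold solve
  cases h : s.toList with
  | nil => simp [PySem.List.pyRange_one_eq_nil (by norm_num : (0:Int) ≤ 1), mcTop]
  | cons c t =>
    have hb := bridgeA (c :: t) t.length 1 (c :: t) 0 c le_rfl (by rw [List.length_cons]; omega) rfl
      (fun j _ => rfl) (by simp)
    simp only [List.length_cons, Nat.cast_one] at hb
    simpa [mcTop] using hb

lemma fdiv2 (r : Int) : PySem.Int.floordiv r 2 = r / 2 :=
  PySem.Int.floordiv_eq_ediv_of_pos (by norm_num)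

-- core invariant: with current run (char p, length r ≥ 1), B's remaining loop equals
-- res + r/2 + mc eff rest (eff = '*' iff r even); strictly below iff badStar flags rest.
lemma bLoop_mc : ∀ (t : List Char) (p : Char) (r res : Int), 1 ≤ r →
    (if badStar p (decide (r % 2 = 0)) t
     then bLoop res r (some p) t < res + r / 2 + mc (if r % 2 = 0 then '*' else p) t
     else bLoop res r (some p) t = res + r / 2 + mc (if r % 2 = 0 then '*' else p) t) := by
  intro t
  induction t with
  | nil => intro p r res hr; simp [badStar, bLoop, mc]
  | cons c t ih =>
    intro p r res hr
    have hr0 : (0:Int) < r := by omega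
    by_cases hev : r % 2 = 0
    · by_cases hc : c = p
      · subst hc
        have h1 := ih c (r + 1) res (by omega)
        rw [if_neg (by omega : ¬ (r+1) % 2 = 0),
          decide_eq_false (by omega : ¬ (r+1) % 2 = 0)] at h1
        by_cases hst : c = '*'
        · subst hst
          simp only [badStar, bLoop, mc, decide_eq_true hev, if_pos hev, hr0,
            and_self, if_pos] at h1 ⊢
          cases hb : badStar '*' false t <;> simp [hb] at h1 <;> omega
        · simp only [badStar, bLoop, mc, decide_eq_true hev, if_pos hev, hr0, hst,
            and_true, and_false, if_false, if_true,
            Bool.not_true] at h1 ⊢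
          cases hb : badStar c false t <;> simp [hb] at h1 ⊢ <;> omega
      · have h1 := ih c 1 (res + PySem.Int.floordiv r 2) (le_refl 1)
        rw [if_neg (by omega : ¬ (1:Int) % 2 = 0),
          decide_eq_false (by omega : ¬ (1:Int) % 2 = 0)] at h1
        rw [fdiv2] at h1
        by_cases hst : c = '*'
        · subst hst
          simp only [badStar, bLoop, mc, decide_eq_true hev, if_pos hev, hc,
            Option.some.injEq, and_false, if_false, and_true,
            if_true, fdiv2] at h1 ⊢
          cases hb : badStar '*' false t <;> simp [hb] at h1 <;> omega
        · simp only [badStar, bLoop, mc, decide_eq_true hev, if_pos hev, hc, hst,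
            Option.some.injEq, and_false, if_false,
            fdiv2] at h1 ⊢
          cases hb : badStar c false t <;> simp [hb] at h1 ⊢ <;> omega
    · by_cases hc : c = p
      · subst hc
        have h1 := ih c (r + 1) res (by omega)
        rw [if_pos (by omega : (r+1) % 2 = 0),
          decide_eq_true (by omega : (r+1) % 2 = 0)] at h1
        simp only [badStar, bLoop, mc, decide_eq_false hev, if_neg hev, hr0,
          and_self,
          if_true, Bool.not_false] at h1 ⊢
        cases hb : badStar c true t <;> simp [hb] at h1 ⊢ <;> omega
      · have h1 := ih c 1 (res + PySem.Int.floordiv r 2) (le_refl 1)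
        rw [if_neg (by omega : ¬ (1:Int) % 2 = 0),
          decide_eq_false (by omega : ¬ (1:Int) % 2 = 0)] at h1
        rw [fdiv2] at h1
        simp only [badStar, bLoop, mc, decide_eq_false hev, if_neg hev, hc,
          Option.some.injEq, and_false, if_false,
          fdiv2] at h1 ⊢
        cases hb : badStar c false t <;> simp [hb] at h1 ⊢ <;> omega

lemma solve_alt_cons (c : Char) (t : List Char) :
    bLoop 0 0 none (c :: t) = bLoop 0 1 (some c) t := by
  simp [bLoop]

lemma agree_of_not_bad (s : String) (h : dCheck s.toList = false) : solve s = solve_alt s := by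
  rw [solve_eq_mcTop]
  unfold solve_alt
  cases hs : s.toList with
  | nil => simp [mcTop, bLoop]
  | cons c t =>
    rw [hs] at h
    rw [solve_alt_cons]
    have h1 := bLoop_mc t c 1 0 le_rfl
    rw [if_neg (by omega : ¬ (1:Int) % 2 = 0),
      decide_eq_false (by omega : ¬ (1:Int) % 2 = 0)] at h1
    rw [dCheck] at h
    rw [h] at h1
    simp only [Bool.false_eq_true, if_false] at h1
    simp [mcTop, h1]

lemma lt_of_bad (s : String) (h : dCheck s.toList = true) : solve_alt s < solve s := by
  rw [solve_eq_mcTop]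
  unfold solve_alt
  cases hs : s.toList with
  | nil => rw [hs] at h; simp [dCheck] at h
  | cons c t =>
    rw [hs] at h
    rw [solve_alt_cons]
    have h1 := bLoop_mc t c 1 0 le_rfl
    rw [if_neg (by omega : ¬ (1:Int) % 2 = 0),
      decide_eq_false (by omega : ¬ (1:Int) % 2 = 0)] at h1
    rw [dCheck] at h
    rw [h] at h1
    simp only [if_true] at h1
    simpa [mcTop] using h1

-- ===== VERDICT (by name: the statement is the Claim_ definition above) =====
theorem solve_spec : Claim_unchanged_solve := by
  intro s _
  unfold Spec_solve
  intro hnd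
  have h : dCheck s.toList = false := by
    rw [← Bool.not_eq_true]
    intro hc
    exact hnd ((dCheck_iff_D s).mp hc)
  exact agree_of_not_bad s h

theorem solve_changed : Claim_changed_solve := by
  unfold Claim_changed_solve; decide

theorem solve_tight : Claim_exact_solve := by
  intro s _ hd
  exact (lt_of_bad s ((dCheck_iff_D s).mpr hd)).ne'
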